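-- pv_equiv track=rewrite | github.com/cecileDo/TPHadoop | combiner_flickr.py | get_list_tag_by_country
-- ===== SOURCE A (Python) =====
-- def get_list_tag_by_country(data):
--     """
--     for each contry build list of tag
--     """
--     data_dict = dict()
--     for line in data:
--         if line.strip():
--             line = line.strip().split('\t')
--             # line contain country tag values
--             if len(line) == 2:
--                 # create a dict of list of tag
--                 country = line[0]
--                 if country in data_dict:
--                     data_dict[country].append(line[1])
--                 else:
--                     data_dict[country] = [line[1]]
--     return data_dict
-- ===== SOURCE B (Python) =====
-- def get_list_tag_by_country(data):
--     """
--     for each contry build list of tag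
--     """
--     # pass 1: parse every line into a (country, tag) pair, keeping only
--     # rows that strip+split('\t') into exactly two fields
--     pairs = []
--     for line in data:
--         parts = line.strip().split('\t')
--         if len(parts) == 2:
--             pairs.append((parts[0], parts[1]))
--     # pass 2: countries in first-occurrence order, then gather each
--     # country's tags by filtering the parsed pairs
--     countries = list(dict.fromkeys(c for c, _ in pairs))
--     return {c: [t for c2, t in pairs if c2 == c] for c in countries}
-- ===== Notes on version B (the rewrite author's own statement) =====
-- stated objective: alternative
-- what changed: Replaces the one-pass dict-building loop by a parse-then-group decomposition: one pass parses lines into (country, tag) pairs, then countries are deduplicated in first-occurrence order and each group is gathered by filtering the parsed pairs.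
import Mathlib
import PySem

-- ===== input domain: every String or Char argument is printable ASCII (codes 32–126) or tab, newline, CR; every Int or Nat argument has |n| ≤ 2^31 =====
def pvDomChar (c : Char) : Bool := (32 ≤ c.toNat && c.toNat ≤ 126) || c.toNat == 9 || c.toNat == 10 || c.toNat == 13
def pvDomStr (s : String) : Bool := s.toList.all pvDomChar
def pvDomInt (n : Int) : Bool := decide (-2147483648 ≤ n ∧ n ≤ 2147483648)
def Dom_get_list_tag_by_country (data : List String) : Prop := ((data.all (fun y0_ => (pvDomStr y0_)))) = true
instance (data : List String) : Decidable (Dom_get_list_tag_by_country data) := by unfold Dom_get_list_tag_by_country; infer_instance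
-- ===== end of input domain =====

-- B replaces A's one-pass dict-building loop by a parse-then-group decomposition (parse pairs, dedup countries, filter per country); equal output, no speed claim.


-- ===== PORT A =====
-- literal port of A's loop body; 's.split('\t')' is PySem.Str.split? (none only for an empty separator, so '.getD []' is never taken)
def pvStepA (data_dict : PySem.Dict String (List String)) (line : String) : PySem.Dict String (List String) :=
  if PySem.Str.strip line ≠ "" then
    let parts := (PySem.Str.split? (PySem.Str.strip line) "\t").getD []
    if parts.length = 2 then
      let country := PySem.List.pyGetD parts 0 ""
      let tag := PySem.List.pyGetD parts 1 ""
      if data_dict.contains country then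
        data_dict.modify country [] (fun l => l ++ [tag])
      else
        data_dict.insert country [tag]
    else data_dict
  else data_dict

def get_list_tag_by_country (data : List String) : List (String × List String) :=
  (data.foldl pvStepA PySem.Dict.empty).items

-- ===== PORT B =====
-- B's parser: strip, split on '\t', keep exactly-two-field rows
def pvParseLine (line : String) : Option (String × String) :=
  match (PySem.Str.split? (PySem.Str.strip line) "\t").getD [] with
  | [c, t] => some (c, t)
  | _ => none

def get_list_tag_by_country_alt (data : List String) : List (String × List String) :=
  let pairs := data.filterMap pvParseLine
  let countries := PySem.List.dedup (pairs.map (fun p => p.1))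
  countries.map (fun c => (c, (pairs.filter (fun p => p.1 == c)).map (fun p => p.2)))

-- ===== PRECONDITION & SPEC =====
def Spec_get_list_tag_by_country (data : List String) (out : List (String × List String)) : Prop := out = get_list_tag_by_country_alt data
instance (data : List String) (out : List (String × List String)) : Decidable (Spec_get_list_tag_by_country data out) := by unfold Spec_get_list_tag_by_country; infer_instance

-- ===== CLAIM (what is proved, stated in full; the proofs are below) =====
def Claim_equal_get_list_tag_by_country : Prop := ∀ (data : List String), Dom_get_list_tag_by_country data → Spec_get_list_tag_by_country data (get_list_tag_by_country data)

-- ===== LEMMAS AND PROOFS =====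

-- A's loop body, expressed through B's parser: on a parsed pair it is one dict 'modify', otherwise the line is skipped
theorem stepA_eq_parse (d : PySem.Dict String (List String)) (line : String) :
    pvStepA d line
    = (pvParseLine line).elim d (fun p => d.modify p.1 [] (fun l => l ++ [p.2])) := by
  unfold pvStepA pvParseLine
  by_cases hs : PySem.Str.strip line = ""
  · simp only [hs, ne_eq, not_true_eq_false, if_false]
    rfl
  · simp only [hs, ne_eq, not_false_iff, if_true]
    rcases h : (PySem.Str.split? (PySem.Str.strip line) "\t").getD [] with _ | ⟨c, _ | ⟨t, _ | _⟩⟩ <;>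
      simp [PySem.List.pyGetD, PySem.List.pyGet?, PySem.List.pyIdx?]
    by_cases hc : d.contains c = true
    · simp [hc]
    · simp [hc, PySem.Dict.modify, PySem.Dict.getD_of_not_contains d [] (by simpa using hc)]

-- a fold that skips 'none's of a parser is a fold over the filterMap
theorem foldl_elim_filterMap {α β γ : Type} (f : α → Option β) (g : γ → β → γ)
    (l : List α) (init : γ) :
    l.foldl (fun acc x => (f x).elim acc (g acc)) init
      = (l.filterMap f).foldl g init := by
  induction l generalizing init with
  | nil => rfl
  | cons x xs ih =>
    rcases h : f x <;> simp [List.foldl_cons, h, ih]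

-- ===== VERDICT (by name: the statement is the Claim_ definition above) =====
theorem get_list_tag_by_country_spec : Claim_equal_get_list_tag_by_country := by
  intro data _
  unfold Spec_get_list_tag_by_country get_list_tag_by_country get_list_tag_by_country_alt
  have h1 := PySem.List.foldl_congr_mem data pvStepA (fun d line =>
        (pvParseLine line).elim d (fun p => d.modify p.1 [] (fun l => l ++ [p.2])))
      PySem.Dict.empty (fun d line _ => stepA_eq_parse d line)
  rw [h1]
  have h2 := foldl_elim_filterMap pvParseLine (fun d p => d.modify p.1 [] (fun l => l ++ [p.2])) data PySem.Dict.empty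
  beta_reduce at h2
  rw [h2]
  set pairs := data.filterMap pvParseLine with hpairs
  have hnd : (pairs.foldl (fun d p => d.modify p.1 [] (fun l => l ++ [p.2])) PySem.Dict.empty).keys.Nodup :=
    PySem.Dict.nodup_keys_foldl_modify_key pairs (fun p => p.1) [] (fun _ p => (fun l => l ++ [p.2])) PySem.Dict.empty PySem.Dict.nodup_keys_empty
  rw [PySem.Dict.items_eq_map_keys _ hnd []]
  rw [PySem.Dict.keys_foldl_modify_key pairs (fun p => p.1) [] (fun _ p => (fun l => l ++ [p.2])) PySem.Dict.empty]
  simp only [PySem.Dict.keys_empty, PySem.Set.update_nil_left, PySem.List.dedup_eq_ofList]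
  refine List.map_congr_left ?_
  intro c _
  rw [PySem.Dict.getD_foldl_modify_append pairs PySem.Dict.empty c]
  simp [PySem.Dict.getD_empty]
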